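-- pv_equiv track=rewrite | github.com/RiFinkelstein/Pythonprojects | friend_calc.py | calculate_friendship_score
-- ===== SOURCE A (Python) =====
-- def calculate_friendship_score(name1, name2):
--     # Define rules for awarding points
--     vowel_points = 1
--     friend_points = 2
--
--     # Define vowels and characters in the word "friend"
--     vowels = "AEIOUaeiou"
--     friend_chars = "FRIENDfriend"
--
--     # Initialize score variables
--     score1 = 0
--     score2 = 0
--
--     # Loop through characters in name1 and name2
--     for char in name1:
--         if char in vowels:
--             score1 += vowel_points
--         if char in friend_chars:
--             score1 += friend_points
--
--     for char in name2:
--         if char in vowels: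
--             score2 += vowel_points
--         if char in friend_chars:
--             score2 += friend_points
--
--     # Calculate total score
--     total_score = score1 + score2
--
--     return total_score
-- ===== SOURCE B (Python) =====
-- def calculate_friendship_score(name1, name2):
--     # Build one character-frequency table over both names,
--     # then score by looping over the fixed pattern strings.
--     counts = {}
--     for ch in name1:
--         counts[ch] = counts.get(ch, 0) + 1
--     for ch in name2:
--         counts[ch] = counts.get(ch, 0) + 1
--
--     total = 0
--     for ch in "AEIOUaeiou":
--         total += counts.get(ch, 0)
--     for ch in "FRIENDfriend":
--         total += 2 * counts.get(ch, 0)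
--     return total
-- ===== Notes on version B (the rewrite author's own statement) =====
-- stated objective: idiomatic
-- what changed: Replaces per-character branching over the names with a frequency table built once over both names, scored by two weighted sums driven by the fixed vowel/friend pattern strings.
import Mathlib
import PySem

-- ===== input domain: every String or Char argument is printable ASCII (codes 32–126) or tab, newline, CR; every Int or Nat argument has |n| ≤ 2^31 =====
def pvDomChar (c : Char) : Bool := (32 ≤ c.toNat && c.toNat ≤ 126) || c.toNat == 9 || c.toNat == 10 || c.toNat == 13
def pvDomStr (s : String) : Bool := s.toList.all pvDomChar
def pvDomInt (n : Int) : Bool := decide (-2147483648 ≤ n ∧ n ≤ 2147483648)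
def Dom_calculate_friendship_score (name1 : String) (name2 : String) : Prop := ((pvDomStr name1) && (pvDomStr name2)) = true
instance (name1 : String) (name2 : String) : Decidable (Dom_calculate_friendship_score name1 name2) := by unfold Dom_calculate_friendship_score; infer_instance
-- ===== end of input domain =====

-- B builds one character-frequency table over both names and scores via the fixed
-- pattern strings, instead of A's per-character branching; objective: idiomatic.


-- ===== PORT A =====
def calculate_friendship_score (name1 : String) (name2 : String) : Int :=
  let vowels := "AEIOUaeiou".toList
  let friend_chars := "FRIENDfriend".toList
  let score1 : Int := name1.toList.foldl (fun s c =>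
    let s := if c ∈ vowels then s + 1 else s
    if c ∈ friend_chars then s + 2 else s) 0
  let score2 : Int := name2.toList.foldl (fun s c =>
    let s := if c ∈ vowels then s + 1 else s
    if c ∈ friend_chars then s + 2 else s) 0
  score1 + score2

-- ===== PORT B =====
def calculate_friendship_score_alt (name1 : String) (name2 : String) : Int :=
  -- counts[ch] = counts.get(ch, 0) + 1  ↦  Dict.modify ch 0 (· + 1)
  let counts : PySem.Dict Char Int :=
    name2.toList.foldl (fun d c => d.modify c 0 (· + 1))
      (name1.toList.foldl (fun d c => d.modify c 0 (· + 1)) PySem.Dict.empty)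
  let total : Int := "AEIOUaeiou".toList.foldl (fun t c => t + counts.getD c 0) 0
  "FRIENDfriend".toList.foldl (fun t c => t + 2 * counts.getD c 0) total

-- ===== PRECONDITION & SPEC =====
def Spec_calculate_friendship_score (name1 : String) (name2 : String) (out : Int) : Prop := out = calculate_friendship_score_alt name1 name2
instance (name1 : String) (name2 : String) (out : Int) : Decidable (Spec_calculate_friendship_score name1 name2 out) := by unfold Spec_calculate_friendship_score; infer_instance

-- ===== CLAIM (what is proved, stated in full; the proofs are below) =====
def Claim_equal_calculate_friendship_score : Prop := ∀ (name1 : String) (name2 : String), Dom_calculate_friendship_score name1 name2 → Spec_calculate_friendship_score name1 name2 (calculate_friendship_score name1 name2)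

-- ===== LEMMAS AND PROOFS =====

-- per-character weight of A's two branch tests
def pvW (c : Char) : Int :=
  (if c ∈ "AEIOUaeiou".toList then (1:Int) else 0) +
  (if c ∈ "FRIENDfriend".toList then (2:Int) else 0)

lemma pvA_foldl (l : List Char) (a : Int) :
    l.foldl (fun s c =>
      let s := if c ∈ "AEIOUaeiou".toList then s + 1 else s
      if c ∈ "FRIENDfriend".toList then s + 2 else s) a
      = a + (l.map pvW).sum := by
  induction l generalizing a with
  | nil => simp
  | cons x l ih =>
    simp only [List.foldl_cons, List.map_cons, List.sum_cons, ih, pvW]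
    split_ifs <;> ring

lemma pvB_foldl (g : Char → Int) (P : List Char) (a : Int) :
    P.foldl (fun t c => t + g c) a = a + (P.map g).sum := by
  induction P generalizing a with
  | nil => simp
  | cons x P ih => simp [ih]; ring

lemma pv_sum_ite (x : Char) (P : List Char) (hP : P.Nodup) :
    (P.map (fun c => if x = c then (1:Int) else 0)).sum
      = if x ∈ P then (1:Int) else 0 := by
  induction P with
  | nil => simp
  | cons y P ih =>
    rcases List.nodup_cons.mp hP with ⟨hy, hP'⟩
    by_cases hxy : x = y
    · subst hxy
      have hmap : P.map (fun c => if x = c then (1:Int) else 0)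
          = P.map (fun _ => (0:Int)) :=
        List.map_congr_left (fun c hc => if_neg (fun h : x = c => hy (h.symm ▸ hc)))
      simp [hmap]
    · simp [hxy, ih hP']

lemma pv_map_add (k : Int) (x : Char) (l : List Char) (P : List Char) :
    (P.map (fun c => k * ((l.count c : Int) + if x = c then (1:Int) else 0))).sum
      = (P.map (fun c => k * (l.count c : Int))).sum
        + k * (P.map (fun c => if x = c then (1:Int) else 0)).sum := by
  induction P with
  | nil => simp
  | cons y P ih =>
    simp only [List.map_cons, List.sum_cons, ih]
    ring

lemma pv_sum_count (k : Int) (P : List Char) (hP : P.Nodup) (l : List Char) :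
    (P.map (fun c => k * (l.count c : Int))).sum
      = (l.map (fun x => if x ∈ P then k else 0)).sum := by
  induction l with
  | nil => simp
  | cons x l ih =>
    have hcnt : ∀ c : Char, (((x :: l).count c : Nat) : Int)
        = (l.count c : Int) + if x = c then (1:Int) else 0 := by
      intro c
      by_cases h : x = c
      · subst h; simp
      · simp [h]
    simp only [hcnt, pv_map_add, ih, pv_sum_ite x P hP, List.map_cons, List.sum_cons]
    split_ifs <;> ring

-- the counter built in B's first two loops is PySem.Dict.counter of the concatenation
lemma pv_counts_eq (l1 l2 : List Char) (c : Char) :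
    (l2.foldl (fun d c => d.modify c 0 (· + 1))
      (l1.foldl (fun d c => d.modify c 0 (· + 1)) PySem.Dict.empty)).getD c 0
      = ((l1 ++ l2).count c : Int) := by
  rw [← List.foldl_append, ← PySem.Dict.counter_eq_foldl, PySem.Dict.getD_counter]

lemma pv_nodup_V : ("AEIOUaeiou".toList).Nodup := by decide
lemma pv_nodup_F : ("FRIENDfriend".toList).Nodup := by decide

-- ===== VERDICT (by name: the statement is the Claim_ definition above) =====
theorem calculate_friendship_score_spec : Claim_equal_calculate_friendship_score := by
  intro name1 name2 _
  unfold Spec_calculate_friendship_score calculate_friendship_score calculate_friendship_score_alt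
  simp only [pvA_foldl, pvB_foldl]
  set l : List Char := name1.toList ++ name2.toList with hl
  have hcnt : ∀ c : Char,
      (name2.toList.foldl (fun d c => d.modify c 0 (· + 1))
        (name1.toList.foldl (fun d c => d.modify c 0 (· + 1)) PySem.Dict.empty)).getD c 0
        = ((l.count c : Nat) : Int) := pv_counts_eq _ _
  have hV : ("AEIOUaeiou".toList.map (fun c => ((l.count c : Nat) : Int))).sum
      = (l.map (fun x => if x ∈ "AEIOUaeiou".toList then (1:Int) else 0)).sum := by
    have := pv_sum_count 1 _ pv_nodup_V l
    simpa using this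
  have hF : ("FRIENDfriend".toList.map (fun c => 2 * ((l.count c : Nat) : Int))).sum
      = (l.map (fun x => if x ∈ "FRIENDfriend".toList then (2:Int) else 0)).sum :=
    pv_sum_count 2 _ pv_nodup_F l
  have hsplit : (l.map pvW).sum
      = (l.map (fun x => if x ∈ "AEIOUaeiou".toList then (1:Int) else 0)).sum
        + (l.map (fun x => if x ∈ "FRIENDfriend".toList then (2:Int) else 0)).sum := by
    induction l with
    | nil => simp
    | cons x l ih => simp only [List.map_cons, List.sum_cons, ih, pvW]; ring
  have hA : (name1.toList.map pvW).sum + (name2.toList.map pvW).sum = (l.map pvW).sum := by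
    rw [hl, List.map_append, List.sum_append]
  simp only [hcnt, hV, hF]
  omega
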